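-- pv_equiv track=rewrite | github.com/yeonkkk/algorithm | 백준/Silver/26215. 눈 치우기/눈 치우기.py | check_time
-- ===== SOURCE A (Python) =====
-- def check_time(n, houses):
--     if n == 1: return houses[0]
--
--     time = 0
--     while True:
--         houses.sort(reverse=True)
--
--         if houses[0] == 0:
--             return time
--
--         if houses[1] == 0 and houses[0] > 0:
--             houses[0] -= 1
--             time += 1
--             continue
--
--         houses[0] -= 1
--         houses[1] -= 1
--         time += 1
-- ===== SOURCE B (Python) =====
-- def check_time(n, houses):
--     if n == 1:
--         return houses[0]
--     # total time = max(tallest pile, ceil(total positive snow / 2))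
--     return max(max(houses), -(-sum(x for x in houses if x > 0) // 2))
-- ===== Notes on version B (the rewrite author's own statement) =====
-- stated objective: faster
-- what changed: Replaced A's simulation loop (re-sorting the list and shovelling the two largest piles every time unit) by the closed form max(max(houses), ceil(positive_sum/2)) computed in one pass.
import Mathlib
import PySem

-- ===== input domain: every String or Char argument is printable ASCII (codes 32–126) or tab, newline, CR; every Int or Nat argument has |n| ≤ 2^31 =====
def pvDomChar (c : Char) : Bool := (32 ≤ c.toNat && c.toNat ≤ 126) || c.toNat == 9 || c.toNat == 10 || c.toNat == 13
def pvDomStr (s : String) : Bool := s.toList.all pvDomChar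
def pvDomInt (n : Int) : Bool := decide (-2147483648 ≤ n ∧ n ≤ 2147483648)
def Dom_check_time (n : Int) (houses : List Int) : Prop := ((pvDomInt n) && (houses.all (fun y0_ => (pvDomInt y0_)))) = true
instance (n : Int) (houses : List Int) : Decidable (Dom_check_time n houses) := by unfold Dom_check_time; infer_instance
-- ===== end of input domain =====

-- B replaces A's step-by-step simulation (re-sort, shovel the two largest piles each time unit)
-- by the one-pass closed form max(max(houses), ceil(positive_sum/2)); equivalence is about the
-- RETURN value only (A sorts `houses` in place, B does not mutate it).


-- ===== PORT A =====
-- houses.sort(reverse=True)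
def ctSortDesc (hs : List Int) : List Int := PySem.List.sorted hs (fun x => x) true

-- the `while True` loop; `fuel` is only a totality guard (Pre_ guarantees it is never exhausted:
-- each iteration lowers the positive snow total by at least 1)
def ctLoop : Nat → List Int → Int → Int
  | 0, _, t => t
  | fuel+1, hs, t =>
    match ctSortDesc hs with
    | [] => t                                   -- houses[0] raises IndexError: excluded by Pre_
    | s0 :: tl =>
      if s0 = 0 then t
      else
        match tl with
        | [] => t                               -- houses[1] raises IndexError: excluded by Pre_
        | s1 :: rest =>
          if s1 = 0 ∧ s0 > 0 then ctLoop fuel ((s0 - 1) :: s1 :: rest) (t + 1)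
          else ctLoop fuel ((s0 - 1) :: (s1 - 1) :: rest) (t + 1)

def check_time (n : Int) (houses : List Int) : Int :=
  if n = 1 then (match houses with
    | h :: _ => h
    | [] => 0)                                  -- houses[0] raises IndexError: excluded by Pre_
  else ctLoop ((houses.filter (fun x => 0 < x)).sum.toNat + 1) houses 0

-- ===== PORT B =====
def check_time_alt (n : Int) (houses : List Int) : Int :=
  if n = 1 then (match houses with
    | h :: _ => h
    | [] => 0)                                  -- houses[0] raises IndexError: excluded by Pre_
  else
    max ((PySem.List.max? houses (fun x => x)).getD 0)
        (-(PySem.Int.floordiv (-((houses.filter (fun x => 0 < x)).sum)) 2))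

-- ===== PRECONDITION & SPEC =====
-- Pre_ excludes exactly the inputs where A does not return: IndexError (empty list when n == 1;
-- fewer than two houses with a nonzero first pile when n ≠ 1) and divergence (n ≠ 1 with every
-- pile negative, where A decrements two negative piles forever).
def Pre_check_time (n : Int) (houses : List Int) : Prop :=
  if n = 1 then houses ≠ []
  else (2 ≤ houses.length ∧ ∃ x ∈ houses, 0 ≤ x) ∨ houses = [0]
instance (n : Int) (houses : List Int) : Decidable (Pre_check_time n houses) := by
  unfold Pre_check_time; infer_instance
def pvWitness_check_time : Int × List Int := (3, [2, 0, 5])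

def Spec_check_time (n : Int) (houses : List Int) (out : Int) : Prop := out = check_time_alt n houses
instance (n : Int) (houses : List Int) (out : Int) : Decidable (Spec_check_time n houses out) := by unfold Spec_check_time; infer_instance

-- ===== CLAIM (what is proved, stated in full; the proofs are below) =====
def Claim_equal_check_time : Prop := ∀ (n : Int) (houses : List Int), Dom_check_time n houses → Pre_check_time n houses → Spec_check_time n houses (check_time n houses)

-- ===== LEMMAS AND PROOFS =====

-- positive snow total
def posSum (hs : List Int) : Int := (hs.filter (fun x => 0 < x)).sum

lemma posSum_nonneg (hs : List Int) : 0 ≤ posSum hs := by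
  apply List.sum_nonneg
  intro x hx
  have := List.of_mem_filter hx
  simpa using le_of_lt (by simpa using this)

lemma posSum_cons (a : Int) (l : List Int) :
    posSum (a :: l) = (if 0 < a then a else 0) + posSum l := by
  unfold posSum
  by_cases h : 0 < a <;> simp [h]

lemma posSum_perm {l₁ l₂ : List Int} (h : l₁.Perm l₂) : posSum l₁ = posSum l₂ :=
  (h.filter _).sum_eq

lemma posSum_eq_zero_of_nonpos {hs : List Int} (h : ∀ x ∈ hs, x ≤ 0) : posSum hs = 0 := by
  unfold posSum
  have : hs.filter (fun x => 0 < x) = [] := by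
    simp only [List.filter_eq_nil_iff]
    intro x hx
    simpa using not_lt.2 (h x hx)
  simp [this]

lemma le_posSum_of_mem {hs : List Int} {x : Int} (hx : x ∈ hs) (hpos : 0 < x) :
    x ≤ posSum hs := by
  unfold posSum
  exact List.single_le_sum (fun y hy => le_of_lt (by simpa using List.of_mem_filter hy)) x
    (List.mem_filter.2 ⟨hx, by simpa using hpos⟩)

-- value of Python's max(hs) when m bounds hs and m ∈ hs
lemma max_getD_eq {hs : List Int} {m : Int} (hm : m ∈ hs) (hb : ∀ y ∈ hs, y ≤ m) :
    (PySem.List.max? hs (fun x => x)).getD 0 = m := by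
  obtain ⟨w, hw⟩ : ∃ w, PySem.List.max? hs (fun x => x) = some w := by
    cases h : PySem.List.max? hs (fun x => x) with
    | none => exact absurd ((PySem.List.max?_eq_none_iff _ _).1 h) (by rintro rfl; simp at hm)
    | some w => exact ⟨w, rfl⟩
  have hwmem := PySem.List.max?_mem hw
  have hwmax := PySem.List.max?_isMax hw
  have h1 : w ≤ m := hb w hwmem
  have h2 : m ≤ w := hwmax m hm
  simp [hw, le_antisymm h1 h2]

-- ceiling division as B computes it
def ceil2 (s : Int) : Int := -(PySem.Int.floordiv (-s) 2)

lemma ceil2_eq (s : Int) : ceil2 s = -((-s) / 2) := by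
  unfold ceil2
  rw [PySem.Int.floordiv_eq_ediv_of_pos (by norm_num)]

-- the closed form the loop computes
def target (m s : Int) : Int := max m (ceil2 s)

-- main loop invariant: on a list with ≥ 2 piles and a nonnegative pile, with enough fuel,
-- the loop adds max(max pile, ceil(positive total / 2)) to the accumulator
lemma ctLoop_eq : ∀ (fuel : Nat) (hs : List Int) (t : Int),
    2 ≤ hs.length → (∃ x ∈ hs, 0 ≤ x) → (posSum hs).toNat < fuel →
    ctLoop fuel hs t = t + target ((PySem.List.max? hs (fun x => x)).getD 0) (posSum hs) := by
  intro fuel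
  induction fuel with
  | zero => intro hs t _ _ hf; omega
  | succ fuel ih =>
    intro hs t hlen hex hf
    have hperm : (ctSortDesc hs).Perm hs := PySem.List.sorted_perm hs (fun x => x) true
    have hlen' : 2 ≤ (ctSortDesc hs).length := by rw [hperm.length_eq]; exact hlen
    obtain ⟨s0, s1, rest, hs_eq⟩ : ∃ s0 s1 rest, ctSortDesc hs = s0 :: s1 :: rest := by
      match h : ctSortDesc hs with
      | [] => rw [h] at hlen'; simp at hlen'
      | [a] => rw [h] at hlen'; simp at hlen'
      | a :: b :: r => exact ⟨a, b, r, rfl⟩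
    have hhead : ∀ y ∈ hs, y ≤ s0 := by
      intro y hy
      exact PySem.List.key_head_sorted_rev_ge hs (fun x => x) hs_eq y hy
    have hs0mem : s0 ∈ hs := hperm.mem_iff.1 (by rw [hs_eq]; simp)
    have hs1mem : s1 ∈ hs := hperm.mem_iff.1 (by rw [hs_eq]; simp)
    have hmax : (PySem.List.max? hs (fun x => x)).getD 0 = s0 := max_getD_eq hs0mem hhead
    have hpw : (ctSortDesc hs).Pairwise (fun a b => b ≤ a) :=
      PySem.List.sorted_pairwise_rev hs (fun x => x)
    rw [hs_eq] at hpw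
    have hs1le : s1 ≤ s0 := (List.pairwise_cons.1 hpw).1 s1 (by simp)
    have hrest1 : ∀ y ∈ rest, y ≤ s1 :=
      fun y hy => (List.pairwise_cons.1 (List.pairwise_cons.1 hpw).2).1 y hy
    have hrest0 : ∀ y ∈ rest, y ≤ s0 := fun y hy => le_trans (hrest1 y hy) hs1le
    have hs0nn : 0 ≤ s0 := by
      obtain ⟨x, hx, hx0⟩ := hex
      exact le_trans hx0 (hhead x hx)
    have hP : posSum hs = posSum (s0 :: s1 :: rest) := by rw [← hs_eq]; exact (posSum_perm hperm).symm
    have hPrest_nn := posSum_nonneg rest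
    show ctLoop (fuel + 1) hs t = _
    rw [ctLoop, hs_eq]
    dsimp only
    by_cases h0 : s0 = 0
    · -- all piles ≤ 0: nothing to shovel
      rw [if_pos h0]
      have hall : ∀ x ∈ hs, x ≤ 0 := fun x hx => h0 ▸ hhead x hx
      have : posSum hs = 0 := posSum_eq_zero_of_nonpos hall
      rw [this, hmax, h0]
      unfold target
      rw [ceil2_eq]
      omega
    · rw [if_neg h0]
      have hs0pos : 0 < s0 := lt_of_le_of_ne hs0nn (Ne.symm h0)
      have hPs : posSum hs = s0 + ((if 0 < s1 then s1 else 0) + posSum rest) := by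
        rw [hP, posSum_cons, posSum_cons]
        simp [hs0pos]
      by_cases h1 : s1 = 0 ∧ s0 > 0
      · -- only the tallest pile is nonzero: shovel it alone
        rw [if_pos h1]
        obtain ⟨h1z, _⟩ := h1
        have hrest_np : ∀ y ∈ rest, y ≤ 0 := fun y hy => h1z ▸ hrest1 y hy
        have hPrest : posSum rest = 0 := posSum_eq_zero_of_nonpos hrest_np
        have hPhs : posSum hs = s0 := by rw [hPs, h1z, hPrest]; simp
        -- the recursive call's list
        have hmem' : ∀ y ∈ (s0 - 1) :: s1 :: rest, y ≤ s0 - 1 := by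
          intro y hy
          rcases List.mem_cons.1 hy with h | hy'
          · omega
          · rcases List.mem_cons.1 hy' with h | h
            · omega
            · have := hrest_np y h; omega
        have hmax' : (PySem.List.max? ((s0 - 1) :: s1 :: rest) (fun x => x)).getD 0 = s0 - 1 :=
          max_getD_eq (by simp) hmem'
        have hP' : posSum ((s0 - 1) :: s1 :: rest) = s0 - 1 := by
          rw [posSum_cons, posSum_cons, h1z, hPrest]
          split_ifs <;> omega
        rw [ih ((s0 - 1) :: s1 :: rest) (t + 1) (by simp) ⟨s0 - 1, by simp, by omega⟩
            (by rw [hP']; rw [hPhs] at hf; omega)]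
        rw [hmax', hP', hmax, hPhs]
        unfold target
        rw [ceil2_eq, ceil2_eq]
        omega
      · -- shovel the two tallest piles
        rw [if_neg h1]
        have h1ne : s1 ≠ 0 := by
          intro hz; exact h1 ⟨hz, hs0pos⟩
        -- facts about the recursive call's list
        have hex' : ∃ x ∈ (s0 - 1) :: (s1 - 1) :: rest, 0 ≤ x := ⟨s0 - 1, by simp, by omega⟩
        have hmem' : ∀ y ∈ (s0 - 1) :: (s1 - 1) :: rest, y ≤ s0 := by
          intro y hy
          rcases List.mem_cons.1 hy with h | hy'
          · omega
          · rcases List.mem_cons.1 hy' with h | h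
            · omega
            · exact hrest0 y h
        obtain ⟨w, hw⟩ : ∃ w, PySem.List.max? ((s0 - 1) :: (s1 - 1) :: rest) (fun x => x) = some w := by
          cases hcase : PySem.List.max? ((s0 - 1) :: (s1 - 1) :: rest) (fun x => x) with
          | none => exact absurd ((PySem.List.max?_eq_none_iff _ _).1 hcase) (by simp)
          | some w => exact ⟨w, rfl⟩
        have hgetD : (PySem.List.max? ((s0 - 1) :: (s1 - 1) :: rest) (fun x => x)).getD 0 = w := by
          rw [hw]; rfl
        have hwlo : s0 - 1 ≤ w := PySem.List.max?_isMax hw (s0 - 1) (by simp)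
        have hwhi : w ≤ s0 := hmem' w (PySem.List.max?_mem hw)
        have hwrest : w = s0 → s0 ≤ posSum rest ∧ s1 = s0 := by
          intro hmeq
          have hwmem := PySem.List.max?_mem hw
          have hwr : w ∈ rest := by
            rcases List.mem_cons.1 hwmem with h | hw'
            · omega
            · rcases List.mem_cons.1 hw' with h | h
              · omega
              · exact h
          refine ⟨hmeq ▸ le_posSum_of_mem hwr (hmeq ▸ hs0pos), ?_⟩
          have := hrest1 w hwr
          omega
        by_cases h1pos : 0 < s1
        · -- both shovelled piles were positive: positive total drops by 2
          have hP' : posSum ((s0 - 1) :: (s1 - 1) :: rest) = posSum hs - 2 := by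
            rw [posSum_cons, posSum_cons, hPs]
            simp only [h1pos, if_true]
            split_ifs <;> omega
          have hPhs2 : 2 ≤ posSum hs := by rw [hPs]; simp only [h1pos, if_true]; omega
          rw [ih ((s0 - 1) :: (s1 - 1) :: rest) (t + 1) (by simp) hex'
              (by rw [hP']; omega)]
          rw [hP', hmax, hgetD]
          unfold target
          rw [ceil2_eq, ceil2_eq]
          have hs0S : s0 + s1 ≤ posSum hs := by rw [hPs]; simp only [h1pos, if_true]; omega
          by_cases hms : w = s0
          · obtain ⟨h3, h4⟩ := hwrest hms
            have h3' : 3 * s0 ≤ posSum hs := by rw [hPs, if_pos h1pos]; omega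
            omega
          · have : w = s0 - 1 := by omega
            omega
        · -- second pile negative (A still shovels it): positive total drops by 1
          have hs1neg : s1 < 0 := by omega
          have hrest_np : ∀ y ∈ rest, y ≤ 0 := fun y hy => le_of_lt (lt_of_le_of_lt (hrest1 y hy) hs1neg)
          have hPrest : posSum rest = 0 := posSum_eq_zero_of_nonpos hrest_np
          have hPhs : posSum hs = s0 := by rw [hPs]; simp only [h1pos, if_false]; omega
          have hP' : posSum ((s0 - 1) :: (s1 - 1) :: rest) = s0 - 1 := by
            rw [posSum_cons, posSum_cons, hPrest]
            split_ifs <;> omega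
          have hwne : w ≤ s0 - 1 := by
            have hwmem := PySem.List.max?_mem hw
            rcases List.mem_cons.1 hwmem with h | hw'
            · omega
            · rcases List.mem_cons.1 hw' with h | h
              · omega
              · have := hrest_np w h; omega
          rw [ih ((s0 - 1) :: (s1 - 1) :: rest) (t + 1) (by simp) hex'
              (by rw [hP']; rw [hPhs] at hf; omega)]
          rw [hP', hmax, hgetD, hPhs]
          unfold target
          rw [ceil2_eq, ceil2_eq]
          omega

-- ===== VERDICT (by name: the statement is the Claim_ definition above) =====
theorem check_time_spec : Claim_equal_check_time := by
  unfold Claim_equal_check_time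
  intro n houses _ hpre
  unfold Spec_check_time Pre_check_time at *
  by_cases hn : n = 1
  · simp only [hn, if_true] at hpre ⊢
    unfold check_time check_time_alt
    simp
  · simp only [hn, if_false] at hpre ⊢
    rcases hpre with ⟨hlen, hex⟩ | hz
    · unfold check_time check_time_alt
      simp only [hn, if_false]
      rw [ctLoop_eq ((houses.filter (fun x => 0 < x)).sum.toNat + 1) houses 0 hlen hex
          (by unfold posSum; omega)]
      unfold target posSum
      rw [ceil2_eq, zero_add, PySem.Int.floordiv_eq_ediv_of_pos (by norm_num)]
    · subst hz
      unfold check_time check_time_alt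
      rw [if_neg hn, if_neg hn]
      decide
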